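-- pv_equiv track=rewrite | github.com/ehpale/elaphe | elaphe/qrcode.py | decode_n_base
-- ===== SOURCE A (Python) =====
-- ALNUM = '0123456789ABCDEFGHIJKLMNOPQRSTUVWXYZ $%*+-./:'
--
-- def decode_n_base(s, digits=1, mode='digits'):
--     """Converts string representation of arbitrary based digits into integers.
--
--     Returns tuples of number of digested digits and decoded value.
--
--     >>> list(decode_n_base('ABC', mode='alnum'))
--     [(11, 461), (6, 12)]
--     >>> list(decode_n_base('300', mode='digits'))
--     [(10, 300)]
--     >>> list(decode_n_base('FF', mode='8bits'))
--     [(8, 70), (8, 70)]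
--     """
--     while True:
--         if mode=='alnum':
--             head, tail = s[:2], s[2:]
--             if len(head)==2:
--                 yield (11, ALNUM.find(head[0])*45+ALNUM.find(head[1]))
--             elif len(head)==1:
--                 yield (6, ALNUM.find(head[0]))
--             else:
--                 break
--         elif mode=='digits':
--             head, tail = s[:3], s[3:]
--             if len(head):
--                 yield (len(head)*3+1, int(head))
--             else:
--                 break
--         else:
--             head, tail = s[:1], s[1:]
--             if len(head):
--                 yield (8, ord(head))
--             else:
--                 break
--         s = tail
--     return
-- ===== SOURCE B (Python) =====
-- ALNUM = '0123456789ABCDEFGHIJKLMNOPQRSTUVWXYZ $%*+-./:'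
--
-- def decode_n_base(s, digits=1, mode='digits'):
--     """Dispatch on mode once, then run a dedicated per-mode loop."""
--     if mode == 'alnum':
--         for i in range(0, len(s), 2):
--             pair = s[i:i + 2]
--             if len(pair) == 2:
--                 yield (11, ALNUM.find(pair[0]) * 45 + ALNUM.find(pair[1]))
--             else:
--                 yield (6, ALNUM.find(pair))
--     elif mode == 'digits':
--         for i in range(0, len(s), 3):
--             chunk = s[i:i + 3]
--             yield (len(chunk) * 3 + 1, int(chunk))
--     else:
--         for ch in s:
--             yield (8, ord(ch))
-- ===== Notes on version B (the rewrite author's own statement) =====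
-- stated objective: faster
-- what changed: Dispatch on mode once at the top and run a dedicated index-stride loop per mode (range(0,len,2)/range(0,len,3)/per-character) instead of one while-True loop that re-tests the mode and rebuilds the tail string s[2:]/s[3:]/s[1:] on every iteration.
import Mathlib
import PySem

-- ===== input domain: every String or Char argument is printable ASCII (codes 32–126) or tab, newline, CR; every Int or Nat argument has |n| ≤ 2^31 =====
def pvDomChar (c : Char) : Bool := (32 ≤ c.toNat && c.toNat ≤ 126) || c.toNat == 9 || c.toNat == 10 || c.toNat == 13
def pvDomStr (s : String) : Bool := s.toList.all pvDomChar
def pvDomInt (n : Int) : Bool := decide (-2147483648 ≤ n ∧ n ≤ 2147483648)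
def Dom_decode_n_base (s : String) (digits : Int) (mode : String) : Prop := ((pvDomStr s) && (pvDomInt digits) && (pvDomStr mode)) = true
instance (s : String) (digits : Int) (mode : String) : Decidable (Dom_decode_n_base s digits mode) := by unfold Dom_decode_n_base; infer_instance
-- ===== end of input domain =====

-- B dispatches on `mode` once and runs one dedicated loop per mode instead of A's single
-- while-True loop that re-tests the mode and rebuilds the tail string each iteration (objective: faster; measured).

-- ===== PORT A =====

-- ALNUM.find(<one-char string>) : first index of the char in ALNUM, -1 if absent
def pvAlnumFind (c : Char) : Int :=
  PySem.Str.find "0123456789ABCDEFGHIJKLMNOPQRSTUVWXYZ $%*+-./:" (String.mk [c])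

-- the while-True loop of A: the generator's full output from the current `s`
def pvDecodeLoop (mode : String) (l : List Char) : List (Int × Int) :=
  if mode = "alnum" then
    -- head, tail = s[:2], s[2:]
    if (l.take 2).length = 2 then
      (11, pvAlnumFind (l.take 2)[0]! * 45 + pvAlnumFind (l.take 2)[1]!) :: pvDecodeLoop mode (l.drop 2)
    else if (l.take 2).length = 1 then
      (6, pvAlnumFind (l.take 2)[0]!) :: pvDecodeLoop mode (l.drop 2)
    else []
  else if mode = "digits" then
    -- head, tail = s[:3], s[3:]
    if (l.take 3).length ≠ 0 then
      match PySem.Int.ofStr? (String.mk (l.take 3)) with  -- int(head)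
      | some v => ((((l.take 3).length : Int)) * 3 + 1, v) :: pvDecodeLoop mode (l.drop 3)
      | none => []  -- Python raises ValueError here; such inputs are outside Pre_
    else []
  else
    -- head, tail = s[:1], s[1:]
    if (l.take 1).length ≠ 0 then
      (8, ((l.take 1)[0]!.toNat : Int)) :: pvDecodeLoop mode (l.drop 1)
    else []
termination_by l.length
decreasing_by all_goals (simp_all only [List.length_take, List.length_drop, ne_eq]; omega)

def decode_n_base (s : String) (digits : Int) (mode : String) : List (Int × Int) :=
  pvDecodeLoop mode s.toList

-- ===== PORT B =====

-- for i in range(0, len(s), 2): pair = s[i:i+2]; yield the 2- or 1-char decoding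
def pvAltAlnum (l : List Char) (i : Nat) : List (Int × Int) :=
  if i < l.length then
    -- pair = s[i:i+2] (0 ≤ i, so drop/take is exact)
    if ((l.drop i).take 2).length = 2 then
      (11, pvAlnumFind ((l.drop i).take 2)[0]! * 45 + pvAlnumFind ((l.drop i).take 2)[1]!) :: pvAltAlnum l (i + 2)
    else
      (6, PySem.Str.find "0123456789ABCDEFGHIJKLMNOPQRSTUVWXYZ $%*+-./:" (String.mk ((l.drop i).take 2)))
        :: pvAltAlnum l (i + 2)
  else []
termination_by l.length - i
decreasing_by all_goals omega

-- for i in range(0, len(s), 3): chunk = s[i:i+3]; yield (len(chunk)*3+1, int(chunk))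
def pvAltDigits (l : List Char) (i : Nat) : List (Int × Int) :=
  if i < l.length then
    -- chunk = s[i:i+3]
    match PySem.Int.ofStr? (String.mk ((l.drop i).take 3)) with  -- int(chunk)
    | some v => ((((l.drop i).take 3).length : Int) * 3 + 1, v) :: pvAltDigits l (i + 3)
    | none => []  -- Python raises ValueError here; such inputs are outside Pre_
  else []
termination_by l.length - i
decreasing_by all_goals omega

def decode_n_base_alt (s : String) (digits : Int) (mode : String) : List (Int × Int) :=
  if mode = "alnum" then pvAltAlnum s.toList 0
  else if mode = "digits" then pvAltDigits s.toList 0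
  else s.toList.map (fun ch => ((8 : Int), (ch.toNat : Int)))  -- for ch in s: yield (8, ord(ch))

-- ===== PRECONDITION & SPEC =====

-- every successive 3-char chunk of the string parses as a Python int
def pvDigitsOK : List Char → Bool
  | [] => true
  | [a] => (PySem.Int.ofStr? (String.mk [a])).isSome
  | [a, b] => (PySem.Int.ofStr? (String.mk [a, b])).isSome
  | a :: b :: c :: rest => (PySem.Int.ofStr? (String.mk [a, b, c])).isSome && pvDigitsOK rest

-- Pre_ excludes exactly the inputs where A raises ValueError: mode 'digits' with some
-- 3-char chunk that int() cannot parse.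
def Pre_decode_n_base (s : String) (digits : Int) (mode : String) : Prop :=
  mode = "digits" → pvDigitsOK s.toList = true
instance (s : String) (digits : Int) (mode : String) : Decidable (Pre_decode_n_base s digits mode) := by
  unfold Pre_decode_n_base; infer_instance

def pvWitness_decode_n_base : String × Int × String := ("300", 1, "digits")

def Spec_decode_n_base (s : String) (digits : Int) (mode : String) (out : List (Int × Int)) : Prop := out = decode_n_base_alt s digits mode
instance (s : String) (digits : Int) (mode : String) (out : List (Int × Int)) : Decidable (Spec_decode_n_base s digits mode out) := by unfold Spec_decode_n_base; infer_instance

-- ===== CLAIM (what is proved, stated in full; the proofs are below) =====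
def Claim_equal_decode_n_base : Prop := ∀ (s : String) (digits : Int) (mode : String), Dom_decode_n_base s digits mode → Pre_decode_n_base s digits mode → Spec_decode_n_base s digits mode (decode_n_base s digits mode)

-- ===== LEMMAS AND PROOFS =====

theorem loop_nil (mode : String) : pvDecodeLoop mode [] = [] := by
  rw [pvDecodeLoop]; split_ifs <;> simp_all

theorem pvAltAlnum_eq (l : List Char) (i : Nat) :
    pvAltAlnum l i = pvDecodeLoop "alnum" (l.drop i) := by
  fun_induction pvAltAlnum l i with
  | case1 i hi hp ih =>
    rw [pvDecodeLoop]
    simp only [List.drop_drop, ite_true]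
    rw [if_pos hp, ih]
  | case2 i hi hp ih =>
    rw [pvDecodeLoop]
    simp only [List.drop_drop, ite_true]
    have h1 : ((l.drop i).take 2).length = 1 := by
      simp only [List.length_take, List.length_drop] at hp ⊢; omega
    obtain ⟨a, ha⟩ := List.length_eq_one_iff.mp h1
    rw [if_neg hp, if_pos h1, ih, ha]
    simp [pvAlnumFind]
  | case3 i hi =>
    rw [List.drop_of_length_le (by omega), loop_nil]

theorem pvAltDigits_eq (l : List Char) (i : Nat) :
    pvAltDigits l i = pvDecodeLoop "digits" (l.drop i) := by
  fun_induction pvAltDigits l i with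
  | case1 i hi v hv ih =>
    rw [pvDecodeLoop]
    rw [if_neg (by decide), if_pos rfl]
    have hne : ((l.drop i).take 3).length ≠ 0 := by
      simp only [List.length_take, List.length_drop]; omega
    rw [if_pos hne]
    simp only [List.drop_drop, hv, ih]
  | case2 i hi hv =>
    rw [pvDecodeLoop]
    rw [if_neg (by decide), if_pos rfl]
    have hne : ((l.drop i).take 3).length ≠ 0 := by
      simp only [List.length_take, List.length_drop]; omega
    rw [if_pos hne]
    simp only [hv]
  | case3 i hi =>
    rw [List.drop_of_length_le (by omega), loop_nil]

theorem pvMap_eq (mode : String) (h1 : mode ≠ "alnum") (h2 : mode ≠ "digits") (l : List Char) :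
    l.map (fun ch => ((8 : Int), (ch.toNat : Int))) = pvDecodeLoop mode l := by
  induction l with
  | nil => rw [loop_nil]; rfl
  | cons c tl ih =>
    rw [pvDecodeLoop, if_neg h1, if_neg h2]
    simp only [List.take_succ_cons, List.take_zero, List.drop_succ_cons, List.drop_zero]
    simpa using ih

-- ===== VERDICT (by name: the statement is the Claim_ definition above) =====
theorem decode_n_base_spec : Claim_equal_decode_n_base := by
  intro s digits mode _ _
  unfold Spec_decode_n_base decode_n_base decode_n_base_alt
  by_cases h1 : mode = "alnum"
  · simp [h1, pvAltAlnum_eq s.toList 0]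
  · by_cases h2 : mode = "digits"
    · simp [h2, pvAltDigits_eq s.toList 0]
    · simp [h1, h2, pvMap_eq mode h1 h2 s.toList]
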